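-- pv_equiv track=rewrite | github.com/Kawser-nerd/CLCDSA | Source Codes/CodeJamData/14/32/19.py | VerifyCars
-- ===== SOURCE A (Python) =====
-- def VerifyCars (cars):
-- 	for car in cars:
-- 		visible = set([car[0]])
-- 		streak = car[0]
-- 		for i in car:
-- 			if i != streak and i in visible:
-- 				return False
-- 			if i != streak:
-- 				streak = i
-- 				visible.add(i)
-- 	return True
-- ===== SOURCE B (Python) =====
-- def VerifyCars(cars):
--     for car in cars:
--         runs = []
--         for lane in car:
--             if not runs or runs[-1] != lane:
--                 runs.append(lane)
--         if len(runs) != len(set(runs)):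
--             return False
--     return True
-- ===== Notes on version B (the rewrite author's own statement) =====
-- stated objective: simpler
-- what changed: Instead of A's single-pass streak/visited-set scan with an early return inside the element loop, B run-length-compresses each car's lane list and then checks that the compressed list has no duplicate lanes.
-- outside the precondition, e.g. on VerifyCars([[1, 2, 1], []]): A returns False, B returns False
import Mathlib
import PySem

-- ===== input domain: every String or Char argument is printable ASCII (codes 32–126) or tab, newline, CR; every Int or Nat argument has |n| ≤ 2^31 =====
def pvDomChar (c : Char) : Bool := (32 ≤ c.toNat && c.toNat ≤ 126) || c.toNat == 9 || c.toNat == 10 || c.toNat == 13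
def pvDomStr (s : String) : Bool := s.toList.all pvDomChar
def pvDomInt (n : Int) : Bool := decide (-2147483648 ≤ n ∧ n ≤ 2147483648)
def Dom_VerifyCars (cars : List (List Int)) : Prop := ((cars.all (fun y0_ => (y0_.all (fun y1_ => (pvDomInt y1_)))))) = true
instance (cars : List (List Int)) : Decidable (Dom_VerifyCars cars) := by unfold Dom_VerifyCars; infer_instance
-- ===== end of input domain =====

-- B run-length-compresses each car and checks the compressed list for duplicates; A scans once with a streak value and a visited set.

-- ===== PORT A =====
-- inner loop: 'for i in car' carrying (visible, streak)
def pvACarLoop (visible : PySem.Set Int) (streak : Int) : List Int → Bool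
  | [] => true
  | i :: rest =>
    if i ≠ streak ∧ PySem.Set.contains visible i then false
    else if i ≠ streak then pvACarLoop (PySem.Set.add visible i) i rest
    else pvACarLoop visible streak rest

def VerifyCars : List (List Int) → Bool
  | [] => true
  | car :: rest =>
    match PySem.List.pyGet? car 0 with
    | none => true  -- car[0] raises IndexError on an empty car; excluded by Pre_VerifyCars
    | some c0 =>
      if pvACarLoop (PySem.Set.ofList [c0]) c0 car then VerifyCars rest else false

-- ===== PORT B =====
-- 'runs' built by the inner loop of Source B (append lane when it differs from the last run)
def pvRuns (car : List Int) : List Int :=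
  car.foldl (fun runs lane => if runs = [] ∨ runs.getLast? ≠ some lane then runs ++ [lane] else runs) []

def VerifyCars_alt (cars : List (List Int)) : Bool :=
  cars.all (fun car =>
    let runs := pvRuns car
    decide (runs.length = (PySem.Set.ofList runs).length))

-- ===== PRECONDITION & SPEC =====
-- Pre_ excludes inputs containing an empty car: A evaluates car[0] and raises IndexError on the
-- first empty car it reaches (when an earlier car already fails, A returns False and B agrees).
def Pre_VerifyCars (cars : List (List Int)) : Prop := ∀ car ∈ cars, car ≠ []
instance (cars : List (List Int)) : Decidable (Pre_VerifyCars cars) := by unfold Pre_VerifyCars; infer_instance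

def pvWitness_VerifyCars : List (List Int) := [[1, 2, 2, 3], [4, 4]]

def Spec_VerifyCars (cars : List (List Int)) (out : Bool) : Prop := out = VerifyCars_alt cars
instance (cars : List (List Int)) (out : Bool) : Decidable (Spec_VerifyCars cars out) := by unfold Spec_VerifyCars; infer_instance

-- ===== CLAIM (what is proved, stated in full; the proofs are below) =====
def Claim_equal_VerifyCars : Prop := ∀ (cars : List (List Int)), Dom_VerifyCars cars → Pre_VerifyCars cars → Spec_VerifyCars cars (VerifyCars cars)

-- ===== LEMMAS AND PROOFS =====

-- B's per-run step
def pvStep (runs : List Int) (lane : Int) : List Int :=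
  if runs = [] ∨ runs.getLast? ≠ some lane then runs ++ [lane] else runs

lemma pvRuns_eq_foldl (car : List Int) : pvRuns car = car.foldl pvStep [] := rfl

lemma pvStep_prefix (acc : List Int) (rest : List Int) : acc <+: rest.foldl pvStep acc := by
  induction rest generalizing acc with
  | nil => exact List.prefix_rfl
  | cons i t ih =>
    refine List.IsPrefix.trans ?_ (ih (pvStep acc i))
    unfold pvStep; split
    · exact ⟨[i], rfl⟩
    · exact List.prefix_rfl

lemma pvFoldl_not_nodup {acc : List Int} (h : ¬ acc.Nodup) (rest : List Int) :
    ¬ (rest.foldl pvStep acc).Nodup :=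
  fun hn => h (List.Nodup.sublist (pvStep_prefix acc rest).sublist hn)

-- invariant relation between A's (visible, streak) and B's compressed list so far
lemma pvMain (rest : List Int) (runs : List Int) (visible : PySem.Set Int) (streak : Int)
    (hnd : runs.Nodup) (hlast : runs.getLast? = some streak)
    (hmem : ∀ x : Int, x ∈ visible ↔ x ∈ runs) :
    pvACarLoop visible streak rest = decide ((rest.foldl pvStep runs).Nodup) := by
  induction rest generalizing runs visible streak with
  | nil => simp [pvACarLoop, hnd]
  | cons i t ih =>
    by_cases hs : i = streak
    · subst hs
      have hstep : pvStep runs i = runs := by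
        unfold pvStep
        have : runs ≠ [] := by rintro rfl; simp at hlast
        simp [this, hlast]
      simp only [pvACarLoop, ne_eq, not_true_eq_false, false_and, if_false, List.foldl_cons, hstep]
      exact ih runs visible i hnd hlast hmem
    · have hne : runs.getLast? ≠ some i := by rw [hlast]; simpa using fun h => hs h.symm
      have hstep : pvStep runs i = runs ++ [i] := by unfold pvStep; simp [hne]
      by_cases hv : i ∈ visible
      · have hiruns : i ∈ runs := (hmem i).mp hv
        have hcv : PySem.Set.contains visible i = true := (PySem.Set.contains_iff visible i).mpr hv
        have : ¬ (runs ++ [i]).Nodup := by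
          intro h
          exact (List.disjoint_of_nodup_append h) hiruns (by simp)
        simp only [pvACarLoop, ne_eq, hs, not_false_eq_true, true_and, hcv, if_true,
          List.foldl_cons, hstep]
        simp [pvFoldl_not_nodup this t]
      · have hiruns : i ∉ runs := fun h => hv ((hmem i).mpr h)
        have hcv : PySem.Set.contains visible i ≠ true := by
          simp [hv]
        simp only [pvACarLoop, ne_eq, hs, not_false_eq_true, true_and, hcv,
          List.foldl_cons, hstep]
        refine ih (runs ++ [i]) (PySem.Set.add visible i) i ?_ (by simp) ?_
        · rw [List.nodup_append]
          refine ⟨hnd, by simp, ?_⟩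
          intro a ha b hb
          have hbi : b = i := by simpa using hb
          exact fun hab => hiruns (hbi ▸ hab ▸ ha)
        · intro x
          rw [PySem.Set.mem_add visible i x]
          simp [hmem x, or_comm]

-- a list's length equals the length of its set of distinct elements iff it has no duplicates
lemma pvOfListLt (xs : List Int) (hnd : ¬ xs.Nodup) :
    (PySem.Set.ofList xs).length < xs.length := by
  induction xs with
  | nil => simp at hnd
  | cons x t ih =>
    rw [PySem.Set.ofList_cons]
    by_cases hx : x ∈ t
    · have hxo : x ∈ PySem.Set.ofList t := (PySem.Set.mem_ofList t x).mpr hx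
      have h1 : ((PySem.Set.ofList t).discard x).length < (PySem.Set.ofList t).length := by
        unfold PySem.Set.discard
        exact List.length_filter_lt_length_iff_exists.mpr ⟨x, hxo, by simp⟩
      have h2 := PySem.Set.length_ofList_le t
      simp only [List.length_cons]
      omega
    · have ht : ¬ t.Nodup := fun h => hnd (List.nodup_cons.mpr ⟨hx, h⟩)
      have h1 := ih ht
      have h2 : ((PySem.Set.ofList t).discard x).length ≤ (PySem.Set.ofList t).length := by
        unfold PySem.Set.discard
        exact List.length_filter_le _ _
      simp only [List.length_cons]
      omega

lemma pvLenOfList (xs : List Int) : (xs.length = (PySem.Set.ofList xs).length) ↔ xs.Nodup := by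
  constructor
  · intro h
    by_contra hnd
    have := pvOfListLt xs hnd
    omega
  · intro h; rw [PySem.Set.ofList_eq_self_of_nodup xs h]

-- per-car agreement on a nonempty car
lemma pvCar (c0 : Int) (cs : List Int) :
    pvACarLoop (PySem.Set.ofList [c0]) c0 (c0 :: cs)
      = decide ((pvRuns (c0 :: cs)).length = (PySem.Set.ofList (pvRuns (c0 :: cs))).length) := by
  have h1 : pvACarLoop (PySem.Set.ofList [c0]) c0 (c0 :: cs)
      = pvACarLoop (PySem.Set.ofList [c0]) c0 cs := by
    simp [pvACarLoop]
  have h2 : pvRuns (c0 :: cs) = cs.foldl pvStep [c0] := by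
    rw [pvRuns_eq_foldl]
    simp only [List.foldl_cons]
    rfl
  rw [h1, h2, pvMain cs [c0] (PySem.Set.ofList [c0]) c0 (by simp) (by simp)
    (fun x => by rw [PySem.Set.mem_ofList])]
  simp [pvLenOfList]

-- ===== VERDICT (by name: the statement is the Claim_ definition above) =====
theorem VerifyCars_spec : Claim_equal_VerifyCars := by
  intro cars hdom hpre
  unfold Spec_VerifyCars
  induction cars with
  | nil => rfl
  | cons car rest ih =>
    have hdomr : Dom_VerifyCars rest := by
      revert hdom; unfold Dom_VerifyCars; simp_all [List.all_cons]
    have hcar : car ≠ [] := hpre car (by simp)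
    obtain ⟨c0, cs, rfl⟩ : ∃ c0 cs, car = c0 :: cs := by
      cases car with
      | nil => exact absurd rfl hcar
      | cons a b => exact ⟨a, b, rfl⟩
    have hrest : Pre_VerifyCars rest := fun c hc => hpre c (List.mem_cons_of_mem _ hc)
    simp only [VerifyCars, VerifyCars_alt, List.all_cons]
    have hget : PySem.List.pyGet? (c0 :: cs) 0 = some c0 := by
      simp [PySem.List.pyGet?, PySem.List.pyIdx?]
    rw [hget]
    dsimp only
    rw [pvCar c0 cs]
    by_cases hok : (pvRuns (c0 :: cs)).length = (PySem.Set.ofList (pvRuns (c0 :: cs))).length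
    · simp only [hok, decide_true, if_true, Bool.true_and]
      simpa [VerifyCars_alt] using ih hdomr hrest
    · simp [hok]
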